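-- pv_equiv track=rewrite | github.com/0leslaw/l1 | utils.py | get_min_lines
-- ===== SOURCE A (Python) =====
-- def get_min_lines(lines: list[set]):
--     lines = lines[::-1]
--     breakd = 0
--     c_inters = lines[0]
--     for i in range(1, len(lines)):
--         if not lines[i].intersection(lines[i-1]) :
--             for j in range(breakd, i):
--                 lines[j] = c_inters
--             breakd = i
--             c_inters = lines[i]
--
--         else:
--             c_inters = c_inters.intersection(lines[i])
--
--     for j in range(breakd, len(lines)):
--         lines[j] = c_inters
--
--     return lines[::-1]
-- ===== SOURCE B (Python) =====
-- def get_min_lines(lines: list[set]):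
--     # One forward pass materialising the contiguous groups of pairwise-
--     # intersecting consecutive sets, then one intersection per group
--     # (reduction order is irrelevant for set intersection).
--     groups = [[lines[0]]]
--     for s in lines[1:]:
--         if s & groups[-1][-1]:
--             groups[-1].append(s)
--         else:
--             groups.append([s])
--     out = []
--     for g in groups:
--         inter = g[-1]
--         for s in g[:-1]:
--             inter = inter & s
--         out.extend([inter] * len(g))
--     return out
-- ===== Notes on version B (the rewrite author's own statement) =====
-- stated objective: simpler
-- what changed: Instead of reversing the list twice and patching ranges of the reversed list in place with break indices, B makes one forward scan that materialises the contiguous groups of consecutive intersecting sets and then emits each group's full intersection once per member.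
import Mathlib
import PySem

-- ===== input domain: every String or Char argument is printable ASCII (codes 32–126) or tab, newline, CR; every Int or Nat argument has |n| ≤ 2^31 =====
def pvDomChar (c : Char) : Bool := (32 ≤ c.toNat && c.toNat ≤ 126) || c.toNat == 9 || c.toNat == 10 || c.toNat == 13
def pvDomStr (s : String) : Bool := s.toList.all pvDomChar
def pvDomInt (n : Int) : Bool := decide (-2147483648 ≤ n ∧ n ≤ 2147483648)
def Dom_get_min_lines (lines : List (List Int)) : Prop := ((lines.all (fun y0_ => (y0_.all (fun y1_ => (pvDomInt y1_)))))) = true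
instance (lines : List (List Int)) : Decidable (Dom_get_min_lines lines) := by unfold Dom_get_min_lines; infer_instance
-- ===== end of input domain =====

-- B replaces A's double reversal and in-place range patching by a forward scan that
-- materialises the contiguous groups of consecutive intersecting sets and emits each
-- group's full intersection once per member (objective: simpler).

-- ===== PORT A =====
-- the write loop 'for j in range(a, b): lines[j] = c'
def aWrite (c : List Int) (ls : List (List Int)) (a b : Int) : List (List Int) :=
  (PySem.List.pyRange a b).foldl (fun l j => PySem.List.pySetD l j c) ls

-- one iteration of A's main loop; state = (lines, breakd, c_inters)
def aStep (st : List (List Int) × Int × List Int) (i : Int) :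
    List (List Int) × Int × List Int :=
  if PySem.Set.inter (PySem.List.pyGetD st.1 i []) (PySem.List.pyGetD st.1 (i - 1) []) = [] then
    let ls' := aWrite st.2.2 st.1 st.2.1 i
    (ls', i, PySem.List.pyGetD ls' i [])
  else
    (st.1, st.2.1, PySem.Set.inter st.2.2 (PySem.List.pyGetD st.1 i []))

def get_min_lines (lines : List (List Int)) : List (List Int) :=
  let ls0 := (PySem.List.slice? lines none none (-1)).getD []        -- lines = lines[::-1]
  let st :=
    (PySem.List.pyRange 1 (ls0.length : Int)).foldl aStep
      (ls0, 0, PySem.List.pyGetD ls0 0 [])                           -- c_inters = lines[0]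
  (PySem.List.slice? (aWrite st.2.2 st.1 st.2.1 (st.1.length : Int)) none none (-1)).getD []

-- ===== PORT B =====
-- one iteration of B's grouping scan (groups[-1].append(s) / groups.append([s]))
def bStep (gs : List (List (List Int))) (s : List Int) : List (List (List Int)) :=
  if PySem.Set.inter s (PySem.List.pyGetD (PySem.List.pyGetD gs (-1) []) (-1) []) ≠ [] then
    gs.dropLast ++ [PySem.List.pyGetD gs (-1) [] ++ [s]]
  else
    gs ++ [[s]]

-- 'inter = g[-1]; for s in g[:-1]: inter = inter & s; out.extend([inter]*len(g))'
def bEmit (out : List (List Int)) (g : List (List Int)) : List (List Int) :=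
  out ++ List.replicate g.length
    ((PySem.List.slice g none (some (-1))).foldl PySem.Set.inter (PySem.List.pyGetD g (-1) []))

def get_min_lines_alt (lines : List (List Int)) : List (List Int) :=
  match lines with
  | [] => []      -- unreachable: excluded by Pre_ (lines[0] raises IndexError in both Pythons)
  | h :: t => ((t.foldl bStep [[h]]).foldl bEmit [])

-- ===== PRECONDITION & SPEC =====
-- A executes lines[0] first, so the empty list raises IndexError (as does B's lines[0]).
def Pre_get_min_lines (lines : List (List Int)) : Prop := lines ≠ []
instance (lines : List (List Int)) : Decidable (Pre_get_min_lines lines) := by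
  unfold Pre_get_min_lines; infer_instance

def pvWitness_get_min_lines : List (List Int) := [[1, 2], [2, 3], [5]]

def Spec_get_min_lines (lines : List (List Int)) (out : List (List Int)) : Prop :=
  out = get_min_lines_alt lines
instance (lines : List (List Int)) (out : List (List Int)) :
    Decidable (Spec_get_min_lines lines out) := by unfold Spec_get_min_lines; infer_instance

-- ===== CLAIM (what is proved, stated in full; the proofs are below) =====
def Claim_equal_get_min_lines : Prop :=
  ∀ (lines : List (List Int)), Dom_get_min_lines lines → Pre_get_min_lines lines →
    Spec_get_min_lines lines (get_min_lines lines)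

-- ===== LEMMAS AND PROOFS =====

-- Set.inter is a filter of its first argument
lemma inter_filter (s t : List Int) :
    PySem.Set.inter s t = s.filter (fun x => t.contains x) := rfl

lemma foldl_inter_filter (l : List (List Int)) : ∀ a : List Int,
    l.foldl PySem.Set.inter a = a.filter (fun x => l.all (fun s => s.contains x)) := by
  induction l with
  | nil => intro a; simp
  | cons b bs ih =>
    intro a
    rw [List.foldl_cons, ih, inter_filter, List.filter_filter]
    refine List.filter_congr ?_
    intro x _
    simp [Bool.and_comm]

lemma inter_nil_comm (a b : List Int) :
    PySem.Set.inter a b = [] ↔ PySem.Set.inter b a = [] := by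
  simp only [inter_filter, List.filter_eq_nil_iff]
  constructor <;> intro h x hx hc <;>
    exact h x (by simpa using hc) (by simpa using hx)

-- splits off the continuation of the current run of consecutively intersecting sets
def runSplit (prev : List Int) : List (List Int) → List (List Int) × List (List Int)
  | [] => ([], [])
  | b :: bs =>
    if PySem.Set.inter b prev = [] then ([], b :: bs)
    else (b :: (runSplit b bs).1, (runSplit b bs).2)

lemma runSplit_snd_le (l : List (List Int)) : ∀ prev, (runSplit prev l).2.length ≤ l.length := by
  induction l with
  | nil => intro prev; simp [runSplit]
  | cons b bs ih =>
    intro prev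
    by_cases hd : PySem.Set.inter b prev = [] <;> simp [runSplit, hd]
    exact Nat.le_succ_of_le (ih b)

-- the runs of r (groups of consecutively intersecting sets), by front recursion
def grpsR : List (List Int) → List (List (List Int))
  | [] => []
  | b :: bs => (b :: (runSplit b bs).1) :: grpsR (runSplit b bs).2
termination_by l => l.length
decreasing_by exact Nat.lt_succ_of_le (runSplit_snd_le bs b)

def valR (g : List (List Int)) : List Int := g.tail.foldl PySem.Set.inter g.head!

def emitR (r : List (List Int)) : List (List Int) :=
  ((grpsR r).map (fun g => List.replicate g.length (valR g))).flatten

-- functional form of A's main loop on the reversed list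
def go (prev c : List Int) (k : Nat) : List (List Int) → List (List Int)
  | [] => List.replicate k c
  | b :: bs =>
    if PySem.Set.inter b prev = [] then List.replicate k c ++ go b b 1 bs
    else go b (PySem.Set.inter c b) (k + 1) bs

lemma go_spec (rest : List (List Int)) : ∀ prev c k,
    go prev c k rest =
      List.replicate (k + (runSplit prev rest).1.length)
          ((runSplit prev rest).1.foldl PySem.Set.inter c)
        ++ emitR (runSplit prev rest).2 := by
  induction rest with
  | nil => intro prev c k; simp [go, runSplit, emitR, grpsR]
  | cons b bs ih =>
    intro prev c k
    by_cases hd : PySem.Set.inter b prev = []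
    · simp only [go, runSplit, if_pos hd]
      rw [ih b b 1]
      unfold emitR
      rw [grpsR]
      simp only [List.map_cons, List.flatten_cons, valR, List.tail_cons, List.head!_cons,
        List.length_cons, List.length_nil, List.foldl_nil]
      simp [Nat.add_comm]
    · simp only [go, runSplit, if_neg hd]
      rw [ih b (PySem.Set.inter c b) (k + 1)]
      simp only [List.foldl_cons, List.length_cons]
      have : k + 1 + (runSplit b bs).1.length = k + ((runSplit b bs).1.length + 1) := by omega
      rw [this]

lemma emitR_cons_go (b : List Int) (bs : List (List Int)) :
    emitR (b :: bs) = go b b 1 bs := by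
  rw [go_spec bs b b 1]
  unfold emitR
  rw [grpsR]
  simp only [List.map_cons, List.flatten_cons, valR, List.tail_cons, List.head!_cons,
    List.length_cons, Nat.add_comm 1]

lemma set_at_junction (done : List (List Int)) (m c : List Int) (z : List (List Int)) :
    (done ++ (m :: z)).set done.length c = done ++ c :: z := by
  induction done with
  | nil => simp
  | cons d ds ih => simp [ih]

-- the write loop writes c over the middle region
lemma aWrite_spec (c : List Int) : ∀ (k : Nat) (done mid rest : List (List Int)),
    mid.length = k →
    aWrite c (done ++ mid ++ rest) (done.length : Int) ((done.length + k : Nat) : Int)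
      = done ++ List.replicate k c ++ rest := by
  intro k
  induction k with
  | zero =>
    intro done mid rest hmid
    have : mid = [] := List.eq_nil_of_length_eq_zero hmid
    subst this
    simp [aWrite, PySem.List.pyRange_one_eq_nil (le_refl _)]
  | succ k ih =>
    intro done mid rest hmid
    match mid, hmid with
    | m :: mid', hmid =>
      unfold aWrite
      rw [PySem.List.pyRange_one_cons (by push_cast; omega)]
      rw [List.foldl_cons, PySem.List.pySetD_natCast]
      have hset : (done ++ (m :: mid') ++ rest).set done.length c
          = (done ++ [c]) ++ mid' ++ rest := by
        rw [List.append_assoc, List.cons_append, set_at_junction]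
        simp
      rw [hset]
      have harg1 : (done.length : Int) + 1 = (((done ++ [c]).length : Nat) : Int) := by
        simp
      have harg2 : ((done.length + (k + 1) : Nat) : Int)
          = (((done ++ [c]).length + k : Nat) : Int) := by
        simp
        ring
      rw [harg1, harg2]
      rw [show ((PySem.List.pyRange ((done ++ [c]).length : Int)
            (((done ++ [c]).length + k : Nat) : Int)).foldl
            (fun l j => PySem.List.pySetD l j c) ((done ++ [c]) ++ mid' ++ rest))
          = aWrite c ((done ++ [c]) ++ mid' ++ rest) ((done ++ [c]).length : Int)
            (((done ++ [c]).length + k : Nat) : Int) from rfl]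
      rw [ih (done ++ [c]) mid' rest (by simpa using hmid)]
      simp [List.replicate_succ]

lemma read_done_drop (r done : List (List Int)) (bd j : Nat)
    (hlen : done.length = bd) (hbd : bd ≤ j) (_hj : j < r.length) :
    PySem.List.pyGetD (done ++ r.drop bd) (j : Int) [] = r.getD j [] := by
  rw [PySem.List.pyGetD_natCast, List.getD_append_right _ _ _ _ (by omega)]
  rw [List.getD_eq_getElem?_getD, List.getD_eq_getElem?_getD, List.getElem?_drop]
  subst hlen
  have : done.length + (j - done.length) = j := by omega
  rw [this]

-- master lemma: A's loop + final write = 'done' prefix plus the functional 'go'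
lemma aLoop_spec (r : List (List Int)) : ∀ (k i bd : Nat) (done : List (List Int)) (c : List Int),
    i + k = r.length → bd < i → done.length = bd →
    (let st := (PySem.List.pyRange (i : Int) (r.length : Int)).foldl aStep
        (done ++ r.drop bd, (bd : Int), c);
     aWrite st.2.2 st.1 st.2.1 (st.1.length : Int))
      = done ++ go (r.getD (i - 1) []) c (i - bd) (r.drop i) := by
  intro k
  induction k with
  | zero =>
    intro i bd done c hik hbd hdone
    subst hdone
    have hin : i = r.length := by omega
    subst hin
    rw [PySem.List.pyRange_one_eq_nil (le_refl _)]
    simp only [List.foldl_nil]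
    have h1 : (done ++ r.drop done.length).length
        = done.length + (r.length - done.length) := by
      simp only [List.length_append, List.length_drop]
    rw [h1]
    have h2 := aWrite_spec c (r.length - done.length) done (r.drop done.length) []
      (by simp)
    simp only [List.append_nil] at h2
    rw [h2, List.drop_length]
    simp [go]
  | succ k ih =>
    intro i bd done c hik hbd hdone
    subst hdone
    have hin : i < r.length := by omega
    rw [PySem.List.pyRange_one_cons (by exact_mod_cast hin)]
    simp only [List.foldl_cons]
    have hri : PySem.List.pyGetD (done ++ r.drop done.length) (i : Int) [] = r.getD i [] :=
      read_done_drop r done done.length i rfl (by omega) hin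
    have hri1 : PySem.List.pyGetD (done ++ r.drop done.length) ((i : Int) - 1) []
        = r.getD (i - 1) [] := by
      rw [show ((i : Int) - 1) = ((i - 1 : Nat) : Int) by omega]
      exact read_done_drop r done done.length (i - 1) rfl (by omega) (by omega)
    have hdropi : r.drop i = r.getD i [] :: r.drop (i + 1) := by
      rw [List.drop_eq_getElem_cons hin, List.getD_eq_getElem r [] hin]
    simp only [aStep, hri, hri1]
    by_cases hd : PySem.Set.inter (r.getD i []) (r.getD (i - 1) []) = []
    · simp only [if_pos hd]
      have hmid : List.drop done.length r
          = List.take (i - done.length) (List.drop done.length r) ++ List.drop i r := by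
        conv_lhs => rw [← List.take_append_drop (i - done.length) (List.drop done.length r)]
        rw [List.drop_drop, show done.length + (i - done.length) = i from by omega]
      have hls' : aWrite c (done ++ List.drop done.length r) (done.length : Int) (i : Int)
          = done ++ List.replicate (i - done.length) c ++ List.drop i r := by
        conv_lhs => rw [hmid, ← List.append_assoc]
        rw [show ((i : Nat) : Int) = ((done.length + (i - done.length) : Nat) : Int) by
          push_cast; omega]
        rw [aWrite_spec c (i - done.length) done _ _ (by simp [List.length_take]; omega)]
      rw [hls']
      have hcv : PySem.List.pyGetD
          (done ++ List.replicate (i - done.length) c ++ List.drop i r) (i : Int) []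
          = r.getD i [] :=
        read_done_drop r (done ++ List.replicate (i - done.length) c) i i
          (by simp; omega) (le_refl i) hin
      rw [hcv]
      rw [show ((i : Int) + 1) = ((i + 1 : Nat) : Int) by push_cast; ring]
      have hlen' : (done ++ List.replicate (i - done.length) c).length = i := by
        simp only [List.length_append, List.length_replicate]; omega
      have hst : done ++ List.replicate (i - done.length) c ++ List.drop i r
          = (done ++ List.replicate (i - done.length) c)
            ++ List.drop (done ++ List.replicate (i - done.length) c).length r := by
        rw [hlen']
      rw [hst,
        show ((i : Nat) : Int)
          = (((done ++ List.replicate (i - done.length) c).length : Nat) : Int) by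
            rw [hlen'],
        ih (i + 1) (done ++ List.replicate (i - done.length) c).length
          (done ++ List.replicate (i - done.length) c) (r.getD i [])
          (by omega) (by rw [hlen']; omega) rfl]
      rw [hlen']
      rw [show i + 1 - 1 = i by omega, show i + 1 - i = 1 by omega]
      rw [hdropi]
      simp only [go, if_pos hd]
      simp [List.append_assoc]
    · simp only [if_neg hd]
      rw [show ((i : Int) + 1) = ((i + 1 : Nat) : Int) by push_cast; ring]
      rw [ih (i + 1) done.length done (PySem.Set.inter c (r.getD i []))
        (by omega) (by omega) rfl]
      rw [hdropi]
      simp only [go, if_neg hd]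
      rw [show i + 1 - 1 = i by omega, show i + 1 - done.length = (i - done.length) + 1 by omega]

lemma grpsR_nil : grpsR [] = [] := by rw [grpsR]

lemma grpsR_cons (b : List Int) (bs : List (List Int)) :
    grpsR (b :: bs) = (b :: (runSplit b bs).1) :: grpsR (runSplit b bs).2 := by
  rw [grpsR]

lemma A_eq (h : List Int) (t : List (List Int)) :
    get_min_lines (h :: t) = (emitR ((h :: t).reverse)).reverse := by
  obtain ⟨rh, rt, hrr⟩ : ∃ rh rt, (h :: t).reverse = rh :: rt := by
    cases hre : (h :: t).reverse with
    | nil => exact absurd hre (by simp)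
    | cons a l => exact ⟨a, l, rfl⟩
  unfold get_min_lines
  rw [PySem.List.slice?_none_none_neg_one]
  simp only [Option.getD_some]
  have hn : 1 ≤ (h :: t).reverse.length := by rw [hrr]; simp
  have hmain := aLoop_spec ((h :: t).reverse) ((h :: t).reverse.length - 1) 1 0 []
    (PySem.List.pyGetD ((h :: t).reverse) 0 []) (by omega) (by omega) rfl
  simp only [List.drop_zero, List.nil_append, Nat.cast_zero, Nat.cast_one] at hmain
  simp only [hmain]
  rw [PySem.List.slice?_none_none_neg_one]
  simp only [Option.getD_some]
  rw [PySem.List.pyGetD_zero, hrr]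
  simp only [Nat.sub_self, List.getD_cons_zero, List.drop_one, List.tail_cons, Nat.sub_zero]
  rw [← emitR_cons_go]

lemma B_groups (t : List (List Int)) : ∀ h : List Int,
    t.foldl bStep [[h]] = ((grpsR ((h :: t).reverse)).map List.reverse).reverse := by
  induction t using List.reverseRecOn with
  | nil => intro h; simp [grpsR_cons, runSplit, grpsR_nil]
  | append_singleton t s ih =>
    intro h
    rw [List.foldl_append, List.foldl_cons, List.foldl_nil, ih h]
    have hrev : (h :: (t ++ [s])).reverse = s :: (h :: t).reverse := by simp
    rw [hrev]
    obtain ⟨b, bs, hrr⟩ : ∃ b bs, (h :: t).reverse = b :: bs := by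
      cases hre : (h :: t).reverse with
      | nil => exact absurd hre (by simp)
      | cons a l => exact ⟨a, l, rfl⟩
    rw [hrr]
    rw [grpsR_cons b bs, grpsR_cons s (b :: bs)]
    by_cases hd : PySem.Set.inter b s = []
    · simp only [runSplit, if_pos hd, bStep, List.map_cons, List.reverse_cons,
        PySem.List.pyGetD_neg_one_append_singleton]
      rw [if_neg (by simpa using (inter_nil_comm b s).mp hd)]
      rw [grpsR_cons b bs]
      simp
    · have hcond : PySem.Set.inter s b ≠ [] := fun hsb => hd ((inter_nil_comm s b).mp hsb)
      simp only [runSplit, if_neg hd, bStep, List.map_cons, List.reverse_cons,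
        PySem.List.pyGetD_neg_one_append_singleton, List.dropLast_concat]
      rw [if_pos hcond]

lemma foldl_inter_reverse (b : List Int) (u : List (List Int)) :
    (u.reverse).foldl PySem.Set.inter b = u.foldl PySem.Set.inter b := by
  rw [foldl_inter_filter, foldl_inter_filter]
  simp [List.all_reverse]

lemma B_flat : ∀ r : List (List Int),
    List.flatMap
        (fun g => List.replicate g.length
          ((g.dropLast).foldl PySem.Set.inter (PySem.List.pyGetD g (-1) [])))
        (((grpsR r).map List.reverse).reverse)
      = (emitR r).reverse := by
  intro r
  induction r using grpsR.induct with
  | case1 => simp [grpsR_nil, emitR]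
  | case2 b bs ih =>
    rw [grpsR_cons b bs]
    simp only [List.map_cons, List.reverse_cons, List.flatMap_append, ih]
    unfold emitR
    rw [grpsR_cons b bs]
    simp only [List.map_cons, List.flatten_cons, List.reverse_append, List.reverse_replicate]
    congr 1
    simp only [List.flatMap_cons, List.flatMap_nil, List.append_nil,
      PySem.List.pyGetD_neg_one_append_singleton, List.dropLast_concat,
      foldl_inter_reverse, valR, List.tail_cons, List.head!_cons,
      List.length_append, List.length_reverse, List.length_cons, List.length_nil]

lemma B_eq (h : List Int) (t : List (List Int)) :
    get_min_lines_alt (h :: t) = (emitR ((h :: t).reverse)).reverse := by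
  show (( (t.foldl bStep [[h]]) ).foldl bEmit []) = (emitR ((h :: t).reverse)).reverse
  rw [B_groups t h]
  have hfold := PySem.List.foldl_congr_mem
    (((grpsR ((h :: t).reverse)).map List.reverse).reverse) bEmit
    (fun out g => out ++ List.replicate g.length
      ((g.dropLast).foldl PySem.Set.inter (PySem.List.pyGetD g (-1) []))) []
    (fun acc x _ => by simp [bEmit, PySem.List.slice_to_neg_one])
  rw [hfold, PySem.List.foldl_append_eq_flatMap, List.nil_append]
  exact B_flat ((h :: t).reverse)

-- ===== VERDICT (by name: the statement is the Claim_ definition above) =====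
theorem get_min_lines_spec : Claim_equal_get_min_lines := by
  intro lines _ hpre
  unfold Spec_get_min_lines
  match lines with
  | [] => exact absurd rfl hpre
  | h :: t => rw [A_eq, B_eq]
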